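-- pv_equiv track=rewrite | github.com/Joshuadobson/minecraft-tools | tools/build_blocks_with_tags.py | invert_tag_map
-- ===== SOURCE A (Python) =====
-- def invert_tag_map(tag_to_blocks: dict[str, set[str]]) -> dict[str, list[str]]:
--     block_to_tags: dict[str, list[str]] = {}
--     for tag_id, blocks in tag_to_blocks.items():
--         for b in blocks:
--             block_to_tags.setdefault(b, []).append(tag_id)
--     for b in block_to_tags:
--         block_to_tags[b].sort()
--     return block_to_tags
-- ===== SOURCE B (Python) =====
-- def invert_tag_map(tag_to_blocks: dict[str, set[str]]) -> dict[str, list[str]]: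
--     block_to_tags: dict[str, list[str]] = {}
--     for blocks in tag_to_blocks.values():
--         for b in blocks:
--             block_to_tags.setdefault(b, [])
--     for tag in sorted(tag_to_blocks):
--         for b in tag_to_blocks[tag]:
--             block_to_tags[b].append(tag)
--     return block_to_tags
-- ===== Notes on version B (the rewrite author's own statement) =====
-- stated objective: alternative
-- what changed: B first registers every block (empty list), then makes one pass over the tags in sorted order so each block's tag list is built already sorted, eliminating A's per-block trailing sort loop.
import Mathlib
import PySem

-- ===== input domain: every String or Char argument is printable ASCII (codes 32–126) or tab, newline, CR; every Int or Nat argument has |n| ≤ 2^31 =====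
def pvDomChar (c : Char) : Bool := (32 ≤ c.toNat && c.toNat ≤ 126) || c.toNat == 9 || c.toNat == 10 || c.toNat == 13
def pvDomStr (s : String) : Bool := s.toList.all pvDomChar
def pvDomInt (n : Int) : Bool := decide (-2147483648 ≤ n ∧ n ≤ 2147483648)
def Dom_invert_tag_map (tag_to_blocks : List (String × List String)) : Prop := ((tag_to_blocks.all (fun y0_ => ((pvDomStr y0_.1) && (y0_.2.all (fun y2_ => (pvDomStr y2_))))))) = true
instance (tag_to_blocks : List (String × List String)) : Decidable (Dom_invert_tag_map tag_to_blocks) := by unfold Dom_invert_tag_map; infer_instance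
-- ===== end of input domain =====

-- B drops A's per-block sort pass: it registers every block first, then appends the tags in
-- sorted order, so each list is born sorted (objective: alternative decomposition, same cost).
-- Python A's key order is set-iteration dependent; the ports fix the set as its element list.

-- ===== PORT A =====
def invert_tag_map (tag_to_blocks : List (String × List String)) : List (String × List String) :=
  -- block_to_tags = {}; for tag_id, blocks in items: for b in blocks: setdefault(b, []).append(tag_id)
  let d := tag_to_blocks.foldl
    (fun d p => p.2.foldl (fun d b => d.modify b [] (fun ts => ts ++ [p.1])) d)
    PySem.Dict.empty
  -- for b in block_to_tags: block_to_tags[b].sort()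
  (d.keys.foldl (fun d b => d.modify b [] (fun ts => PySem.List.sorted ts (fun x => x) false)) d).items

-- ===== PORT B =====
def invert_tag_map_alt (tag_to_blocks : List (String × List String)) : List (String × List String) :=
  -- for blocks in values: for b in blocks: setdefault(b, [])
  let d0 := tag_to_blocks.foldl
    (fun d p => p.2.foldl (fun d b => d.setdefault b []) d)
    PySem.Dict.empty
  -- for tag in sorted(tag_to_blocks): for b in tag_to_blocks[tag]: block_to_tags[b].append(tag)
  -- (tag is always a key of tag_to_blocks, so the [] default of getD is never used)
  let d := (PySem.List.sorted (tag_to_blocks.map Prod.fst) (fun x => x) false).foldl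
    (fun d tag => ((PySem.Dict.mk tag_to_blocks).getD tag []).foldl
        (fun d b => d.modify b [] (fun ts => ts ++ [tag])) d)
    d0
  d.items

-- ===== PRECONDITION & SPEC =====
-- The association list encodes a Python dict, whose keys are unique; lists with duplicate keys
-- represent no dict input, so they are excluded (A is never called on them).
def Pre_invert_tag_map (tag_to_blocks : List (String × List String)) : Prop :=
  (tag_to_blocks.map Prod.fst).Nodup
instance (tag_to_blocks : List (String × List String)) : Decidable (Pre_invert_tag_map tag_to_blocks) := by unfold Pre_invert_tag_map; infer_instance
def pvWitness_invert_tag_map : (List (String × List String)) :=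
  [("minecraft:logs", ["oak_log", "birch_log"]), ("minecraft:planks", ["oak_planks"]), ("minecraft:burnable", ["oak_log", "oak_planks"])]
def Spec_invert_tag_map (tag_to_blocks : List (String × List String)) (out : List (String × List String)) : Prop := out = invert_tag_map_alt tag_to_blocks
instance (tag_to_blocks : List (String × List String)) (out : List (String × List String)) : Decidable (Spec_invert_tag_map tag_to_blocks out) := by unfold Spec_invert_tag_map; infer_instance

-- ===== CLAIM (what is proved, stated in full; the proofs are below) =====
def Claim_equal_invert_tag_map : Prop := ∀ (tag_to_blocks : List (String × List String)), Dom_invert_tag_map tag_to_blocks → Pre_invert_tag_map tag_to_blocks → Spec_invert_tag_map tag_to_blocks (invert_tag_map tag_to_blocks)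

-- ===== LEMMAS AND PROOFS =====

-- the (block, tag) events, in input order
def pvEv (t : List (String × List String)) : List (String × String) :=
  t.flatMap (fun p => p.2.map (fun b => (b, p.1)))

-- nested append-loops flattened to one fold over the (block, tag) events
theorem pv_flatten {β : Type} (h : β → List String) (k : β → String) :
    ∀ (l : List β) (d : PySem.Dict String (List String)),
    l.foldl (fun d x => (h x).foldl (fun d b => d.modify b [] (fun ts => ts ++ [k x])) d) d
      = (l.flatMap (fun x => (h x).map (fun b => (b, k x)))).foldl
          (fun d p => d.modify p.1 [] (fun ts => ts ++ [p.2])) d := by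
  intro l
  induction l with
  | nil => intro d; rfl
  | cons p l ih =>
    intro d
    simp only [List.foldl_cons, List.flatMap_cons, List.foldl_append, ih]
    congr 1
    rw [List.foldl_map]

theorem pv_flatten_sd : ∀ (l : List (String × List String)) (d : PySem.Dict String (List String)),
    l.foldl (fun d p => p.2.foldl (fun d b => d.setdefault b []) d) d
      = (pvEv l).foldl (fun d e => d.setdefault e.1 []) d := by
  intro l
  induction l with
  | nil => intro d; rfl
  | cons p l ih =>
    intro d
    simp only [List.foldl_cons, pvEv, List.flatMap_cons, List.foldl_append, ih]
    congr 1
    rw [List.foldl_map]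

theorem pv_sd_getD : ∀ (l : List (String × String)) (d : PySem.Dict String (List String)) (c : String),
    (l.foldl (fun d e => d.setdefault e.1 []) d).getD c [] = d.getD c [] := by
  intro l
  induction l with
  | nil => intro d c; rfl
  | cons e l ih =>
    intro d c
    rw [List.foldl_cons, ih]
    by_cases hc : c = e.1
    · subst hc; exact PySem.Dict.getD_setdefault_self d e.1 [] []
    · simp [PySem.Dict.getD, PySem.Dict.get?_setdefault_of_ne d [] hc]

theorem pv_sd_keys : ∀ (l : List (String × String)) (d : PySem.Dict String (List String)),
    (l.foldl (fun d e => d.setdefault e.1 []) d).keys = PySem.Set.update d.keys (l.map Prod.fst) := by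
  intro l
  induction l with
  | nil => intro d; simp [PySem.Set.update]
  | cons e l ih =>
    intro d
    rw [List.foldl_cons, ih, List.map_cons, PySem.Set.update_cons]
    congr 1
    rw [PySem.Dict.keys_setdefault, PySem.Set.add_eq_ite]
    by_cases hc : e.1 ∈ d.keys
    · simp [hc, (PySem.Dict.contains_iff_mem_keys d e.1).mpr hc]
    · have : d.contains e.1 = false := by
        cases hcc : d.contains e.1
        · rfl
        · exact absurd ((PySem.Dict.contains_iff_mem_keys d e.1).mp hcc) hc
      simp [hc, this]

theorem pv_sortfold_getD : ∀ (ks : List String) (d : PySem.Dict String (List String)) (c : String),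
    ks.Nodup →
    (ks.foldl (fun d b => d.modify b [] (fun ts => PySem.List.sorted ts (fun x => x) false)) d).getD c []
      = if c ∈ ks then PySem.List.sorted (d.getD c []) (fun x => x) false else d.getD c [] := by
  intro ks
  induction ks with
  | nil => intro d c _; simp
  | cons k ks ih =>
    intro d c hnd
    rw [List.foldl_cons, ih _ _ hnd.of_cons]
    by_cases hck : c = k
    · subst hck
      have hc : c ∉ ks := (List.nodup_cons.mp hnd).1
      simp [hc]
    · simp [PySem.Dict.getD_modify, hck, List.mem_cons]

theorem pv_update_self (s : PySem.Set String) (xs : List String) (h : ∀ x ∈ xs, x ∈ s) :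
    PySem.Set.update s xs = s := by
  rw [PySem.Set.update_eq_append_filter]
  have hf : (PySem.Set.ofList xs).filter (fun y => !PySem.Set.contains s y) = [] := by
    apply List.filter_eq_nil_iff.mpr
    intro a ha
    have : a ∈ s := h a ((PySem.Set.mem_ofList xs a).mp ha)
    simpa using this
  rw [hf, List.append_nil]

theorem pv_lookup : ∀ (t : List (String × List String)) (p : String × List String),
    (t.map Prod.fst).Nodup → p ∈ t → (PySem.Dict.mk t).get? p.1 = some p.2 := by
  intro t
  induction t with
  | nil => intro p _ hp; cases hp
  | cons q t ih =>
    intro p hnd hp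
    rw [PySem.Dict.get?_mk_cons]
    rcases List.mem_cons.mp hp with hpq | hpt
    · subst hpq; simp
    · have hne : q.1 ≠ p.1 := by
        intro he
        have : p.1 ∈ t.map Prod.fst := List.mem_map.mpr ⟨p, hpt, rfl⟩
        exact (List.nodup_cons.mp (by simpa using hnd)).1 (he ▸ this)
      simp only [beq_iff_eq, hne, if_false]
      exact ih p (List.nodup_cons.mp (by simpa using hnd)).2 hpt

theorem pv_sorted_keys (t : List (String × List String)) (hnd : (t.map Prod.fst).Nodup) :
    PySem.List.sorted (t.map Prod.fst) (fun x => x) false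
      = (PySem.List.sorted t Prod.fst false).map Prod.fst := by
  apply PySem.List.sorted_eq_of_perm_of_pairwise_lt
  · exact (PySem.List.sorted_perm t Prod.fst false).map Prod.fst
  · have h1 : ((PySem.List.sorted t Prod.fst false).map Prod.fst).Pairwise (· ≤ ·) :=
      List.pairwise_map.mpr (PySem.List.sorted_pairwise t Prod.fst)
    have h2 : ((PySem.List.sorted t Prod.fst false).map Prod.fst).Nodup :=
      (((PySem.List.sorted_perm t Prod.fst false).map Prod.fst).symm).nodup hnd
    exact (h1.and h2).imp (fun hab => lt_of_le_of_ne hab.1 hab.2)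

theorem pv_evB (t : List (String × List String)) (hnd : (t.map Prod.fst).Nodup) :
    ((PySem.List.sorted (t.map Prod.fst) (fun x => x) false).flatMap
        (fun tag => ((PySem.Dict.mk t).getD tag []).map (fun b => (b, tag))))
      = pvEv (PySem.List.sorted t Prod.fst false) := by
  rw [pv_sorted_keys t hnd, List.flatMap_map, pvEv]
  apply List.flatMap_congr
  intro p hp
  have hpt : p ∈ t := (PySem.List.sorted_perm t Prod.fst false).mem_iff.mp hp
  have := pv_lookup t p hnd hpt
  simp [PySem.Dict.getD, this]

theorem pv_pairwise_le (c : String) (l : List (String × List String))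
    (h : l.Pairwise (fun p q => p.1 ≤ q.1)) :
    (l.flatMap (fun p => ((p.2.map (fun b => (b, p.1))).filter
        (fun e => e.1 == c)).map (fun e => e.2))).Pairwise (· ≤ ·) := by
  have hmem : ∀ (p : String × List String) (x : String),
      x ∈ ((p.2.map (fun b => (b, p.1))).filter (fun e => e.1 == c)).map (fun e => e.2) → x = p.1 := by
    intro p x hx
    rcases List.mem_map.mp hx with ⟨e, he, rfl⟩
    rcases List.mem_map.mp (List.mem_of_mem_filter he) with ⟨b, _, rfl⟩
    rfl
  rw [List.pairwise_flatMap]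
  constructor
  · intro p _
    apply List.pairwise_of_forall_mem_list
    intro a ha b hb
    rw [hmem p a ha, hmem p b hb]
  · exact h.imp (fun {p q} hpq => fun x hx y hy => by rw [hmem p x hx, hmem q y hy]; exact hpq)

theorem pv_val (t : List (String × List String)) (c : String) :
    PySem.List.sorted ((List.filter (fun e => e.1 == c) (pvEv t)).map (fun e => e.2)) (fun x => x) false
      = (List.filter (fun e => e.1 == c) (pvEv (PySem.List.sorted t Prod.fst false))).map (fun e => e.2) := by
  apply PySem.List.sorted_id_eq_of_perm_of_pairwise
  · refine List.Perm.map _ (List.Perm.filter _ ?_)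
    exact (PySem.List.sorted_perm t Prod.fst false).flatMap (fun a _ => List.Perm.refl _)
  · simp only [pvEv, List.filter_flatMap, List.map_flatMap]
    exact pv_pairwise_le c _ (PySem.List.sorted_pairwise t Prod.fst)

theorem pv_assoc_eq : ∀ (l l' : List (String × List String)),
    l.map Prod.fst = l'.map Prod.fst → (l.map Prod.fst).Nodup →
    (∀ k ∈ l.map Prod.fst, (PySem.Dict.mk l).getD k [] = (PySem.Dict.mk l').getD k []) → l = l' := by
  intro l
  induction l with
  | nil =>
    intro l' h _ _
    exact (List.map_eq_nil_iff.mp h.symm).symm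
  | cons p l ih =>
    intro l' h hnd hv
    cases l' with
    | nil => simp at h
    | cons q l'' =>
      obtain ⟨p1, p2⟩ := p
      obtain ⟨q1, q2⟩ := q
      simp only [List.map_cons, List.cons.injEq] at h
      obtain ⟨h1, h2⟩ := h
      subst h1
      have hval : p2 = q2 := by
        have := hv p1 (by simp)
        simpa [PySem.Dict.getD, PySem.Dict.get?_mk_cons] using this
      have htail : l = l'' := by
        apply ih l'' h2 (by simp only [List.map_cons] at hnd; exact (List.nodup_cons.mp hnd).2)
        intro k hk
        have hkp : k ≠ p1 := fun he => by
          simp only [List.map_cons] at hnd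
          exact (List.nodup_cons.mp hnd).1 (he ▸ hk)
        have := hv k (List.mem_cons_of_mem _ hk)
        simpa [PySem.Dict.getD, PySem.Dict.get?_mk_cons, Ne.symm hkp] using this
      rw [htail, hval]



-- ===== VERDICT (by name: the statement is the Claim_ definition above) =====
theorem pv_ev_perm (t : List (String × List String)) :
    (pvEv (PySem.List.sorted t Prod.fst false)).Perm (pvEv t) :=
  (PySem.List.sorted_perm t Prod.fst false).flatMap (fun _ _ => List.Perm.refl _)

theorem invert_tag_map_spec : Claim_equal_invert_tag_map := by
  intro t _ hnd
  unfold Pre_invert_tag_map at hnd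
  unfold Spec_invert_tag_map invert_tag_map invert_tag_map_alt
  simp only [pv_flatten, pv_flatten_sd, pv_evB t hnd]
  have hev : List.flatMap (fun x => List.map (fun b => (b, x.1)) x.2) t = pvEv t := rfl
  rw [hev]
  set dA := List.foldl (fun d p => d.modify p.1 [] fun ts => ts ++ [p.2]) PySem.Dict.empty (pvEv t) with hdA
  set d0 := List.foldl (fun d e => d.setdefault e.1 []) PySem.Dict.empty (pvEv t) with hd0
  set rA := List.foldl (fun d b => d.modify b [] fun ts => PySem.List.sorted ts fun x => x) dA dA.keys with hrA
  set rB := List.foldl (fun d p => d.modify p.1 [] fun ts => ts ++ [p.2]) d0 (pvEv (PySem.List.sorted t Prod.fst)) with hrB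
  have hKA : dA.keys = PySem.Set.ofList ((pvEv t).map Prod.fst) := by
    rw [hdA]
    have h := PySem.Dict.keys_foldl_modify_key (pvEv t) Prod.fst [] (fun _ e ts => ts ++ [e.2]) PySem.Dict.empty
    simpa [PySem.Set.update_empty] using h
  have hnodK : dA.keys.Nodup := by rw [hKA]; exact PySem.Set.nodup_ofList _
  have hKrA : rA.keys = dA.keys := by
    rw [hrA]
    have h := PySem.Dict.keys_foldl_modify_key dA.keys (fun b => b) []
      (fun _ _ ts => PySem.List.sorted ts (fun x => x) false) dA
    simp only [List.map_id_fun', id] at h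
    exact h.trans (pv_update_self _ _ (fun x hx => hx))
  have hKd0 : d0.keys = PySem.Set.ofList ((pvEv t).map Prod.fst) := by
    rw [hd0, pv_sd_keys]
    exact PySem.Set.update_nil_left _
  have hsub : ∀ x ∈ (pvEv (PySem.List.sorted t Prod.fst false)).map Prod.fst, x ∈ d0.keys := by
    intro x hx
    rw [hKd0, PySem.Set.mem_ofList]
    exact ((pv_ev_perm t).map Prod.fst).mem_iff.mp hx
  have hKrB : rB.keys = d0.keys := by
    rw [hrB]
    have h := PySem.Dict.keys_foldl_modify_key (pvEv (PySem.List.sorted t Prod.fst false))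
      Prod.fst [] (fun _ e ts => ts ++ [e.2]) d0
    exact h.trans (pv_update_self _ _ hsub)
  have hvdA : ∀ c, dA.getD c [] = ((pvEv t).filter (fun e => e.1 == c)).map (fun e => e.2) := by
    intro c
    rw [hdA]
    have h := PySem.Dict.getD_foldl_modify_append (pvEv t) PySem.Dict.empty c
    simpa using h
  have hvrA : ∀ c, rA.getD c []
      = if c ∈ dA.keys then PySem.List.sorted (dA.getD c []) (fun x => x) false else dA.getD c [] := by
    intro c
    rw [hrA]
    exact pv_sortfold_getD dA.keys dA c hnodK
  have hvd0 : ∀ c, d0.getD c [] = [] := by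
    intro c
    rw [hd0, pv_sd_getD]
    rfl
  have hvrB : ∀ c, rB.getD c []
      = ((pvEv (PySem.List.sorted t Prod.fst false)).filter (fun e => e.1 == c)).map (fun e => e.2) := by
    intro c
    rw [hrB]
    have h := PySem.Dict.getD_foldl_modify_append (pvEv (PySem.List.sorted t Prod.fst false)) d0 c
    rw [h, hvd0, List.nil_append]
  have hkeysdef : ∀ (d : PySem.Dict String (List String)), d.items.map Prod.fst = d.keys :=
    fun _ => rfl
  apply pv_assoc_eq
  · rw [hkeysdef, hkeysdef, hKrA, hKrB, hKA, hKd0]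
  · rw [hkeysdef, hKrA]; exact hnodK
  · intro k hk
    have hkK : k ∈ dA.keys := by rw [← hKrA, ← hkeysdef]; exact hk
    show rA.getD k [] = rB.getD k []
    rw [hvrA, hvrB, if_pos hkK, hvdA]
    exact pv_val t k
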